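-- pv_equiv track=rewrite | github.com/TomBombadilV/hack-the-interview-ii | configuring-project-management.py | configureProjectPresentation
-- ===== SOURCE A (Python) =====
-- from typing import List
--
-- def configureProjectPresentation(n: int, friendships: List[List[int]]) -> List[int]:
--     """
--     Method 1
--     """
--     # If there are only 2 students, return empty
--     if n < 3:
--         return [-1]
--
--     # Create adjacency matrix
--     m = [[0 for _ in range(n)] for _ in range(n)]
--     # Add each friendship to the adjacency matrix
--     for f in friendships:
--         # Make sure vertices are valid
--         if f[0] - 1 < n and f[1] - 1 < n and f[0] >= 0 and f[1] >= 0: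
--             # Undirected graph, so edges going both ways (and adjust from
--             # 1-index to 0-index)
--             m[f[0] - 1][f[1] - 1] = 1
--             m[f[1] - 1][f[0] - 1] = 1
--
--     # Get list of two's friends
--     two_friends = [i for i in range(1, n) if m[1][i] == 1]
--     # Go through all of two's friends
--     for tf in two_friends:
--         # If friends with student 1 (index 0), remove edge from 1 to friend
--         if m[0][tf] == 1:
--             m[0][tf] = 0
--         # Go through all of tf's friends
--         for i in range(1, n):
--             # If friends with tf
--             if m[tf][i] == 1:
--                 # If friends with student 1 (index 0), remove edge
--                 if m[0][i] == 1:
--                     m[0][i] = 0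
--
--     # Get list of all of 1's remaining friends (excluding 2 (index 1))
--     invites = [i + 1 for i in range(1, n) if m[0][i] == 1 and not(i == 1)]
--     return invites if invites else [-1]
-- ===== SOURCE B (Python) =====
-- def configureProjectPresentation(n, friendships):
--     # Edge-list passes with sets instead of an n x n adjacency matrix.
--     if n < 3:
--         return [-1]
--     ok = lambda v: 1 <= v <= n
--     # neighbours of student 2
--     two = set()
--     for f in friendships:
--         a, b = f[0], f[1]
--         if ok(a) and ok(b):
--             if a == 2:
--                 two.add(b)
--             if b == 2:
--                 two.add(a)
--     # banned: neighbours of 2 and the friends of those friends (student 1's own row aside)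
--     banned = set(two)
--     for f in friendships:
--         a, b = f[0], f[1]
--         if ok(a) and ok(b):
--             if a in two and a != 1:
--                 banned.add(b)
--             if b in two and b != 1:
--                 banned.add(a)
--     # remaining friends of student 1
--     invites = set()
--     for f in friendships:
--         a, b = f[0], f[1]
--         if ok(a) and ok(b):
--             if a == 1 and b > 2 and b not in banned:
--                 invites.add(b)
--             if b == 1 and a > 2 and a not in banned:
--                 invites.add(a)
--     result = sorted(invites)
--     return result if result else [-1]
-- ===== Notes on version B (the rewrite author's own statement) =====
-- stated objective: faster
-- what changed: B drops A's n x n adjacency matrix and its range(n) scans entirely: three passes over the edge list build the neighbour set of student 2, the banned set (that set plus its members' neighbours), and the surviving friends of student 1, which are then sorted.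
-- outside the precondition, e.g. on configureProjectPresentation(3, [[1]]): A raises IndexError, B raises IndexError; on configureProjectPresentation(4, [[1, 3], [0, 2], [3, 4]]): A returns [-1], B returns [3]
import Mathlib
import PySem

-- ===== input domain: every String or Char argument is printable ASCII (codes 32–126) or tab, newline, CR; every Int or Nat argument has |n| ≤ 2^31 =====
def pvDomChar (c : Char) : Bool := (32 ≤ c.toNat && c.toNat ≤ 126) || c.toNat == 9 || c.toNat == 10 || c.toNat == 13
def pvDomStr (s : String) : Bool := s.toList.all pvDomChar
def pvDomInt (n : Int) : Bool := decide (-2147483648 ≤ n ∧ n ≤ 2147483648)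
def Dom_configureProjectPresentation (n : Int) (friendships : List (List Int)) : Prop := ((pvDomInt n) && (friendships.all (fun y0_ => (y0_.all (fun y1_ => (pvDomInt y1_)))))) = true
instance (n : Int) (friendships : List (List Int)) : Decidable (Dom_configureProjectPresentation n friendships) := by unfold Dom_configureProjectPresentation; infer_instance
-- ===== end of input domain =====

-- B replaces A's n×n adjacency matrix and its nested range(n) scans by three passes
-- over the edge list with hash sets, then one sort (objective: faster on sparse graphs).

-- ===== PORT A =====
-- f[0], f[1]; exact under Pre_ (every row has at least two entries)
def pvF0 (f : List Int) : Int := PySem.List.pyGetD f 0 0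
def pvF1 (f : List Int) : Int := PySem.List.pyGetD f 1 0

-- m[i][j] ; m[i][j] = v  (exact where A uses them: indices in range under Pre_)
def pvRowGet (m : List (List Int)) (i j : Int) : Int :=
  PySem.List.pyGetD (PySem.List.pyGetD m i []) j 0

def pvRowSet (m : List (List Int)) (i j v : Int) : List (List Int) :=
  PySem.List.pySetD m i (PySem.List.pySetD (PySem.List.pyGetD m i []) j v)

-- the body of A's first loop: add one friendship to the adjacency matrix
def pvBuildStep (n : Int) (m : List (List Int)) (f : List Int) : List (List Int) :=
  if pvF0 f - 1 < n ∧ pvF1 f - 1 < n ∧ pvF0 f ≥ 0 ∧ pvF1 f ≥ 0 then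
    pvRowSet (pvRowSet m (pvF0 f - 1) (pvF1 f - 1) 1) (pvF1 f - 1) (pvF0 f - 1) 1
  else m

def pvBuildM (n : Int) (friendships : List (List Int)) : List (List Int) :=
  friendships.foldl (pvBuildStep n)
    (List.replicate n.toNat (List.replicate n.toNat 0))

-- the body of A's second loop: one of two's friends tf, remove 1-tf and 1-(friend of tf) edges
def pvRemoveTf (n : Int) (m : List (List Int)) (tf : Int) : List (List Int) :=
  let m1 := if pvRowGet m 0 tf == 1 then pvRowSet m 0 tf 0 else m
  (PySem.List.pyRange 1 n 1).foldl (fun m i =>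
    if pvRowGet m tf i == 1 then
      (if pvRowGet m 0 i == 1 then pvRowSet m 0 i 0 else m)
    else m) m1

def configureProjectPresentation (n : Int) (friendships : List (List Int)) : List Int :=
  if n < 3 then [-1] else
    let m := pvBuildM n friendships
    let twoFriends := (PySem.List.pyRange 1 n 1).filter (fun i => pvRowGet m 1 i == 1)
    let m2 := twoFriends.foldl (pvRemoveTf n) m
    let invites := ((PySem.List.pyRange 1 n 1).filter
        (fun i => pvRowGet m2 0 i == 1 && !(i == 1))).map (fun i => i + 1)
    if invites = [] then [-1] else invites

-- ===== PORT B =====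
def pvOk (n v : Int) : Bool := 1 ≤ v && v ≤ n

-- shared shape of Source B's three edge-list loops: conditionally add up to two endpoints
def pvPassStep (cond p1 p2 : List Int → Bool) (v1 v2 : List Int → Int)
    (s : PySem.Set Int) (f : List Int) : PySem.Set Int :=
  if cond f then
    let s := if p1 f then PySem.Set.add s (v1 f) else s
    if p2 f then PySem.Set.add s (v2 f) else s
  else s

def pvTwo (n : Int) (friendships : List (List Int)) : PySem.Set Int :=
  friendships.foldl
    (pvPassStep (fun f => pvOk n (pvF0 f) && pvOk n (pvF1 f))
      (fun f => pvF0 f == 2) (fun f => pvF1 f == 2) pvF1 pvF0)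
    PySem.Set.empty

def pvBanned (n : Int) (friendships : List (List Int)) (two : PySem.Set Int) : PySem.Set Int :=
  friendships.foldl
    (pvPassStep (fun f => pvOk n (pvF0 f) && pvOk n (pvF1 f))
      (fun f => PySem.Set.contains two (pvF0 f) && !(pvF0 f == 1))
      (fun f => PySem.Set.contains two (pvF1 f) && !(pvF1 f == 1)) pvF1 pvF0)
    (PySem.Set.ofList two)

def pvInvites (n : Int) (friendships : List (List Int)) (banned : PySem.Set Int) : PySem.Set Int :=
  friendships.foldl
    (pvPassStep (fun f => pvOk n (pvF0 f) && pvOk n (pvF1 f))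
      (fun f => pvF0 f == 1 && 2 < pvF1 f && !(PySem.Set.contains banned (pvF1 f)))
      (fun f => pvF1 f == 1 && 2 < pvF0 f && !(PySem.Set.contains banned (pvF0 f))) pvF1 pvF0)
    PySem.Set.empty

def configureProjectPresentation_alt (n : Int) (friendships : List (List Int)) : List Int :=
  if n < 3 then [-1] else
    let result := PySem.List.sorted
      (pvInvites n friendships (pvBanned n friendships (pvTwo n friendships))) (fun x => x)
    if result = [] then [-1] else result

-- ===== PRECONDITION & SPEC =====
-- Pre_ (only reached when n ≥ 3; A never reads friendships for n < 3) excludes rows with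
-- fewer than two entries, on which A raises IndexError (B raises there too), and rows
-- naming the nonexistent student 0 with the other endpoint in [0, n] — malformed input
-- outside the 1-indexed student domain, where A's negative-index wraparound links student n.
def Pre_configureProjectPresentation (n : Int) (friendships : List (List Int)) : Prop :=
  n < 3 ∨ ∀ f ∈ friendships, 2 ≤ f.length ∧
    ¬ ((pvF0 f = 0 ∧ 0 ≤ pvF1 f ∧ pvF1 f ≤ n) ∨ (pvF1 f = 0 ∧ 0 ≤ pvF0 f ∧ pvF0 f ≤ n))

instance (n : Int) (friendships : List (List Int)) : Decidable (Pre_configureProjectPresentation n friendships) := by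
  unfold Pre_configureProjectPresentation; infer_instance

def pvWitness_configureProjectPresentation : Int × List (List Int) := (4, [[1, 3], [2, 4]])

def Spec_configureProjectPresentation (n : Int) (friendships : List (List Int)) (out : List Int) : Prop := out = configureProjectPresentation_alt n friendships
instance (n : Int) (friendships : List (List Int)) (out : List Int) : Decidable (Spec_configureProjectPresentation n friendships out) := by unfold Spec_configureProjectPresentation; infer_instance

-- ===== CLAIM (what is proved, stated in full; the proofs are below) =====
def Claim_equal_configureProjectPresentation : Prop := ∀ (n : Int) (friendships : List (List Int)), Dom_configureProjectPresentation n friendships → Pre_configureProjectPresentation n friendships → Spec_configureProjectPresentation n friendships (configureProjectPresentation n friendships)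

-- ===== LEMMAS AND PROOFS =====

-- a row naming the nonexistent student 0 whose other endpoint lies in [0, n] (excluded by Pre_)
def pvQuirk (n : Int) (f : List Int) : Prop :=
  (pvF0 f = 0 ∧ 0 ≤ pvF1 f ∧ pvF1 f ≤ n) ∨ (pvF1 f = 0 ∧ 0 ≤ pvF0 f ∧ pvF0 f ≤ n)

-- the valid edges named by the friendship list, on students 1..n
def pvEdg (n : Int) (fs : List (List Int)) (s t : Int) : Prop :=
  ∃ f ∈ fs, (1 ≤ pvF0 f ∧ pvF0 f ≤ n ∧ 1 ≤ pvF1 f ∧ pvF1 f ≤ n) ∧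
    ((pvF0 f = s ∧ pvF1 f = t) ∨ (pvF0 f = t ∧ pvF1 f = s))

-- the students excluded around student 2: its neighbours and their neighbours
def pvBan (n : Int) (fs : List (List Int)) (x : Int) : Prop :=
  pvEdg n fs 2 x ∨ ∃ t, pvEdg n fs 2 t ∧ t ≠ 1 ∧ pvEdg n fs t x

lemma pvEdg_bound (n : Int) (fs : List (List Int)) (s t : Int) (h : pvEdg n fs s t) :
    1 ≤ s ∧ s ≤ n ∧ 1 ≤ t ∧ t ≤ n := by
  obtain ⟨f, _, hok, h⟩ := h; rcases h with ⟨h1, h2⟩ | ⟨h1, h2⟩ <;> omega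

-- ---- B side ----
lemma mem_pvPassStep (cond p1 p2 : List Int → Bool) (v1 v2 : List Int → Int)
    (s : PySem.Set Int) (f : List Int) (x : Int) :
    x ∈ pvPassStep cond p1 p2 v1 v2 s f ↔
      x ∈ s ∨ (cond f = true ∧ ((p1 f = true ∧ x = v1 f) ∨ (p2 f = true ∧ x = v2 f))) := by
  unfold pvPassStep
  split_ifs with h1 h2 h3 h4 <;> simp_all [PySem.Set.mem_add] <;> tauto

lemma mem_foldl_pass (cond p1 p2 : List Int → Bool) (v1 v2 : List Int → Int)
    (fs : List (List Int)) (s : PySem.Set Int) (x : Int) :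
    x ∈ fs.foldl (pvPassStep cond p1 p2 v1 v2) s ↔
      x ∈ s ∨ ∃ f ∈ fs, cond f = true ∧
        ((p1 f = true ∧ x = v1 f) ∨ (p2 f = true ∧ x = v2 f)) := by
  induction fs generalizing s with
  | nil => simp
  | cons f fs ih =>
      rw [List.foldl_cons, ih, mem_pvPassStep]
      constructor
      · rintro ((h | h) | ⟨g, hg, h⟩)
        · exact Or.inl h
        · exact Or.inr ⟨f, List.mem_cons_self, h⟩
        · exact Or.inr ⟨g, List.mem_cons_of_mem _ hg, h⟩
      · rintro (h | ⟨g, hg, h⟩)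
        · exact Or.inl (Or.inl h)
        · rcases List.mem_cons.mp hg with rfl | hg
          · exact Or.inl (Or.inr h)
          · exact Or.inr ⟨g, hg, h⟩

lemma nodup_foldl_pass (cond p1 p2 : List Int → Bool) (v1 v2 : List Int → Int)
    (fs : List (List Int)) (s : PySem.Set Int) (hs : s.Nodup) :
    (fs.foldl (pvPassStep cond p1 p2 v1 v2) s).Nodup := by
  induction fs generalizing s with
  | nil => exact hs
  | cons f fs ih =>
      rw [List.foldl_cons]
      apply ih
      unfold pvPassStep
      split_ifs <;>
        first
          | exact hs
          | exact PySem.Set.nodup_add _ _ hs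
          | exact PySem.Set.nodup_add _ _ (PySem.Set.nodup_add _ _ hs)

lemma mem_pvTwo (n : Int) (fs : List (List Int)) (x : Int) :
    x ∈ pvTwo n fs ↔ pvEdg n fs 2 x := by
  unfold pvTwo pvEdg
  rw [mem_foldl_pass]
  simp only [PySem.Set.empty, List.not_mem_nil, false_or, Bool.and_eq_true, beq_iff_eq,
    pvOk, decide_eq_true_eq]
  constructor
  · rintro ⟨f, hf, ⟨⟨h0a, h0b⟩, ⟨h1a, h1b⟩⟩, (⟨h2, rfl⟩ | ⟨h2, rfl⟩)⟩
    · exact ⟨f, hf, ⟨h0a, h0b, h1a, h1b⟩, Or.inl ⟨h2, rfl⟩⟩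
    · exact ⟨f, hf, ⟨h0a, h0b, h1a, h1b⟩, Or.inr ⟨rfl, h2⟩⟩
  · rintro ⟨f, hf, ⟨h0a, h0b, h1a, h1b⟩, (⟨h2, h3⟩ | ⟨h2, h3⟩)⟩
    · exact ⟨f, hf, ⟨⟨h0a, h0b⟩, ⟨h1a, h1b⟩⟩, Or.inl ⟨h2, h3.symm⟩⟩
    · exact ⟨f, hf, ⟨⟨h0a, h0b⟩, ⟨h1a, h1b⟩⟩, Or.inr ⟨h3, h2.symm⟩⟩

lemma mem_pvBanned (n : Int) (fs : List (List Int)) (x : Int) :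
    x ∈ pvBanned n fs (pvTwo n fs) ↔ pvBan n fs x := by
  unfold pvBanned pvBan
  rw [mem_foldl_pass]
  rw [PySem.Set.mem_ofList, mem_pvTwo]
  apply or_congr Iff.rfl
  constructor
  · rintro ⟨f, hf, hc, (⟨hp, rfl⟩ | ⟨hp, rfl⟩)⟩ <;>
      simp only [Bool.and_eq_true, pvOk, decide_eq_true_eq,
        Bool.not_eq_eq_eq_not, Bool.not_true, beq_eq_false_iff_ne, ne_eq,
        PySem.Set.contains_iff, mem_pvTwo n fs] at hc hp
    · exact ⟨pvF0 f, hp.1, hp.2, f, hf, by omega, Or.inl ⟨rfl, rfl⟩⟩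
    · exact ⟨pvF1 f, hp.1, hp.2, f, hf, by omega, Or.inr ⟨rfl, rfl⟩⟩
  · rintro ⟨t, h2t, ht1, f, hf, hok, (⟨rfl, rfl⟩ | ⟨rfl, rfl⟩)⟩
    · refine ⟨f, hf, ?_, Or.inl ⟨?_, rfl⟩⟩ <;>
        simp [pvOk, mem_pvTwo n fs] <;> tauto
    · refine ⟨f, hf, ?_, Or.inr ⟨?_, rfl⟩⟩ <;>
        simp [pvOk, mem_pvTwo n fs] <;> tauto

lemma mem_pvInvites (n : Int) (fs : List (List Int)) (x : Int) :
    x ∈ pvInvites n fs (pvBanned n fs (pvTwo n fs)) ↔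
      pvEdg n fs 1 x ∧ 2 < x ∧ ¬ pvBan n fs x := by
  unfold pvInvites
  rw [mem_foldl_pass]
  simp only [PySem.Set.empty, List.not_mem_nil, false_or, Bool.and_eq_true, beq_iff_eq,
    pvOk, decide_eq_true_eq, Bool.not_eq_true', Bool.eq_false_iff, ne_eq,
    PySem.Set.contains_iff, mem_pvBanned]
  constructor
  · rintro ⟨f, hf, hc, (⟨⟨⟨h1, h2⟩, h3⟩, rfl⟩ | ⟨⟨⟨h1, h2⟩, h3⟩, rfl⟩)⟩
    · exact ⟨⟨f, hf, by omega, Or.inl ⟨h1, rfl⟩⟩, h2, h3⟩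
    · exact ⟨⟨f, hf, by omega, Or.inr ⟨rfl, h1⟩⟩, h2, h3⟩
  · rintro ⟨⟨f, hf, hok, (⟨h1, h2⟩ | ⟨h1, h2⟩)⟩, hx, hb⟩
    · exact ⟨f, hf, by omega, Or.inl ⟨⟨⟨h1, by omega⟩, by rw [h2]; exact hb⟩, h2.symm⟩⟩
    · exact ⟨f, hf, by omega, Or.inr ⟨⟨⟨h2, by omega⟩, by rw [h1]; exact hb⟩, h1.symm⟩⟩

-- ---- A side ----
def pvShape (n : Int) (m : List (List Int)) : Prop :=
  m.length = n.toNat ∧ ∀ r ∈ m, r.length = n.toNat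

lemma pvRowGet_rowSet (n : Int) (m : List (List Int)) (hm : pvShape n m)
    (a b i j : Int) (v : Int) (ha : 0 ≤ a) (ha' : a < n) (hb : 0 ≤ b) (hb' : b < n)
    (hi : 0 ≤ i) (hi' : i < n) (hj : 0 ≤ j) (hj' : j < n) :
    pvRowGet (pvRowSet m a b v) i j = if i = a ∧ j = b then v else pvRowGet m i j := by
  obtain ⟨hlen, hrows⟩ := hm
  have haN : a.toNat < m.length := by omega
  have hrowlen : (PySem.List.pyGetD m a []).getD b.toNat 0 = (m.getD a.toNat []).getD b.toNat 0 := by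
    rw [PySem.List.pyGetD_of_nonneg _ _ ha]
  have hrow : PySem.List.pyGetD m a [] = m[a.toNat] := by
    rw [PySem.List.pyGetD_of_nonneg _ _ ha, List.getD_eq_getElem?_getD, List.getElem?_eq_getElem haN]
    rfl
  have hrowl : (PySem.List.pyGetD m a []).length = n.toNat := by
    rw [hrow]; exact hrows _ (List.getElem_mem haN)
  unfold pvRowGet pvRowSet
  rw [PySem.List.pySetD_of_nonneg _ _ ha, PySem.List.pySetD_of_nonneg _ _ hb,
    PySem.List.pyGetD_of_nonneg _ _ hi, PySem.List.pyGetD_of_nonneg _ _ hj,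
    PySem.List.pyGetD_of_nonneg _ _ hi, PySem.List.pyGetD_of_nonneg _ _ hj]
  simp only [List.getD_eq_getElem?_getD]
  by_cases hia : i = a
  · subst hia
    rw [List.getElem?_set_self (by omega), Option.getD_some]
    by_cases hjb : j = b
    · subst hjb
      rw [List.getElem?_set_self (by omega), Option.getD_some, if_pos ⟨rfl, rfl⟩]
    · rw [List.getElem?_set_ne (by omega), if_neg (by tauto)]
      rw [hrow]
      rw [List.getElem?_eq_getElem haN]
      rfl
  · rw [List.getElem?_set_ne (by omega), if_neg (by tauto)]

lemma pvShape_rowSet (n : Int) (m : List (List Int)) (hm : pvShape n m)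
    (a b v : Int) (ha : 0 ≤ a) (ha' : a < n) :
    pvShape n (pvRowSet m a b v) := by
  obtain ⟨hlen, hrows⟩ := hm
  have haN : a.toNat < m.length := by omega
  have hrow : PySem.List.pyGetD m a [] = m[a.toNat] := by
    rw [PySem.List.pyGetD_of_nonneg _ _ ha, List.getD_eq_getElem?_getD, List.getElem?_eq_getElem haN]
    rfl
  unfold pvRowSet
  rw [PySem.List.pySetD_of_nonneg _ _ ha]
  constructor
  · rw [List.length_set]; exact hlen
  · intro r hr
    rcases List.mem_or_eq_of_mem_set hr with h | rfl
    · exact hrows _ h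
    · rw [PySem.List.length_pySetD, hrow]; exact hrows _ (List.getElem_mem haN)

lemma pvRows_rowSet0 (m : List (List Int)) (j v : Int) (i : Int) (hi : 1 ≤ i) :
    PySem.List.pyGetD (pvRowSet m 0 j v) i [] = PySem.List.pyGetD m i [] := by
  unfold pvRowSet
  rw [PySem.List.pySetD_of_nonneg _ _ (by omega : (0:Int) ≤ 0),
    PySem.List.pyGetD_of_nonneg _ _ (by omega : (0:Int) ≤ i),
    PySem.List.pyGetD_of_nonneg _ _ (by omega : (0:Int) ≤ i),
    List.getD_eq_getElem?_getD, List.getD_eq_getElem?_getD,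
    List.getElem?_set_ne (by omega)]


lemma pvEdg_cons (n : Int) (f : List Int) (fs : List (List Int)) (s t : Int) :
    pvEdg n (f :: fs) s t ↔
      ((1 ≤ pvF0 f ∧ pvF0 f ≤ n ∧ 1 ≤ pvF1 f ∧ pvF1 f ≤ n) ∧
        ((pvF0 f = s ∧ pvF1 f = t) ∨ (pvF0 f = t ∧ pvF1 f = s))) ∨ pvEdg n fs s t := by
  unfold pvEdg
  simp only [List.mem_cons]
  constructor
  · rintro ⟨g, (rfl | hg), h⟩
    · exact Or.inl h
    · exact Or.inr ⟨g, hg, h⟩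
  · rintro (h | ⟨g, hg, h⟩)
    · exact ⟨f, Or.inl rfl, h⟩
    · exact ⟨g, Or.inr hg, h⟩

lemma pvBuildFold_spec (n : Int) (fs : List (List Int))
    (hPre : ∀ f ∈ fs, ¬ pvQuirk n f) (m0 : List (List Int)) (P : Int → Int → Prop)
    (hm : pvShape n m0)
    (hP : ∀ i j, 0 ≤ i → i < n → 0 ≤ j → j < n → (pvRowGet m0 i j = 1 ↔ P i j)) :
    pvShape n (fs.foldl (pvBuildStep n) m0) ∧
    ∀ i j, 0 ≤ i → i < n → 0 ≤ j → j < n →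
      (pvRowGet (fs.foldl (pvBuildStep n) m0) i j = 1 ↔ (P i j ∨ pvEdg n fs (i + 1) (j + 1))) := by
  induction fs generalizing m0 P with
  | nil =>
      refine ⟨hm, fun i j hi hi' hj hj' => ?_⟩
      rw [List.foldl_nil, hP i j hi hi' hj hj']
      simp [pvEdg]
  | cons f fs ih =>
      rw [List.foldl_cons]
      have hPref := hPre f List.mem_cons_self
      have hPres : ∀ g ∈ fs, ¬ pvQuirk n g := fun g hg => hPre g (List.mem_cons_of_mem _ hg)
      by_cases hg : pvF0 f - 1 < n ∧ pvF1 f - 1 < n ∧ pvF0 f ≥ 0 ∧ pvF1 f ≥ 0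
      · have hok : 1 ≤ pvF0 f ∧ pvF0 f ≤ n ∧ 1 ≤ pvF1 f ∧ pvF1 f ≤ n := by
          unfold pvQuirk at hPref; omega
        have hstep : pvBuildStep n m0 f =
            pvRowSet (pvRowSet m0 (pvF0 f - 1) (pvF1 f - 1) 1) (pvF1 f - 1) (pvF0 f - 1) 1 := by
          unfold pvBuildStep; rw [if_pos hg]
        have hm1 : pvShape n (pvRowSet m0 (pvF0 f - 1) (pvF1 f - 1) 1) :=
          pvShape_rowSet n m0 hm _ _ _ (by omega) (by omega)
        have hm2 : pvShape n (pvBuildStep n m0 f) := by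
          rw [hstep]; exact pvShape_rowSet n _ hm1 _ _ _ (by omega) (by omega)
        have hP2 : ∀ i j, 0 ≤ i → i < n → 0 ≤ j → j < n →
            (pvRowGet (pvBuildStep n m0 f) i j = 1 ↔
              (P i j ∨ ((pvF0 f = i + 1 ∧ pvF1 f = j + 1) ∨ (pvF0 f = j + 1 ∧ pvF1 f = i + 1)))) := by
          intro i j hi hi' hj hj'
          rw [hstep, pvRowGet_rowSet n _ hm1 _ _ _ _ _ (by omega) (by omega) (by omega) (by omega) hi hi' hj hj',
            pvRowGet_rowSet n _ hm _ _ _ _ _ (by omega) (by omega) (by omega) (by omega) hi hi' hj hj']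
          split_ifs with h1 h2
          · simp only [true_iff]; right; right; omega
          · simp only [true_iff]; right; omega
          · rw [hP i j hi hi' hj hj']
            constructor
            · exact Or.inl
            · rintro (h | h)
              · exact h
              · omega
        obtain ⟨hsh, hcont⟩ := ih hPres (pvBuildStep n m0 f) _ hm2 hP2
        refine ⟨hsh, fun i j hi hi' hj hj' => ?_⟩
        rw [hcont i j hi hi' hj hj', pvEdg_cons]
        constructor
        · rintro ((h | h) | h)
          · exact Or.inl h
          · exact Or.inr (Or.inl ⟨hok, by omega⟩)
          · exact Or.inr (Or.inr h)
        · rintro (h | (⟨_, h⟩ | h))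
          · exact Or.inl (Or.inl h)
          · exact Or.inl (Or.inr (by omega))
          · exact Or.inr h
      · have hstep : pvBuildStep n m0 f = m0 := by unfold pvBuildStep; rw [if_neg hg]
        rw [hstep]
        obtain ⟨hsh, hcont⟩ := ih hPres m0 P hm hP
        refine ⟨hsh, fun i j hi hi' hj hj' => ?_⟩
        rw [hcont i j hi hi' hj hj', pvEdg_cons]
        constructor
        · rintro (h | h)
          · exact Or.inl h
          · exact Or.inr (Or.inr h)
        · rintro (h | (⟨hok, _⟩ | h))
          · exact Or.inl h
          · omega
          · exact Or.inr h

lemma pvBuildM_spec (n : Int) (fs : List (List Int))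
    (hPre : ∀ f ∈ fs, ¬ pvQuirk n f) :
    pvShape n (pvBuildM n fs) ∧
    ∀ i j, 0 ≤ i → i < n → 0 ≤ j → j < n →
      (pvRowGet (pvBuildM n fs) i j = 1 ↔ pvEdg n fs (i + 1) (j + 1)) := by
  have hm : pvShape n (List.replicate n.toNat (List.replicate n.toNat (0:Int))) := by
    constructor
    · exact List.length_replicate
    · intro r hr; rw [List.eq_of_mem_replicate hr]; exact List.length_replicate
  have hP : ∀ i j : Int, 0 ≤ i → i < n → 0 ≤ j → j < n →
      (pvRowGet (List.replicate n.toNat (List.replicate n.toNat (0:Int))) i j = 1 ↔ False) := by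
    intro i j hi hi' hj hj'
    unfold pvRowGet
    rw [PySem.List.pyGetD_of_nonneg _ _ hi, PySem.List.pyGetD_of_nonneg _ _ hj]
    simp only [List.getD_eq_getElem?_getD, List.getElem?_replicate]
    split_ifs <;> simp
  obtain ⟨hsh, hcont⟩ := pvBuildFold_spec n fs hPre _ _ hm hP
  refine ⟨hsh, fun i j hi hi' hj hj' => ?_⟩
  rw [pvBuildM]
  rw [hcont i j hi hi' hj hj']
  tauto

lemma pvRowGet_congr_row (m m' : List (List Int)) (t j : Int)
    (h : PySem.List.pyGetD m' t [] = PySem.List.pyGetD m t []) :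
    pvRowGet m' t j = pvRowGet m t j := by
  unfold pvRowGet; rw [h]

set_option maxHeartbeats 1000000 in
lemma pvInner_spec (n tf : Int) (htf : 1 ≤ tf) (htf' : tf < n) (is : List Int)
    (his : ∀ i ∈ is, 1 ≤ i ∧ i < n) (m : List (List Int)) (hm : pvShape n m) :
    pvShape n (is.foldl (fun m i =>
        if pvRowGet m tf i == 1 then
          (if pvRowGet m 0 i == 1 then pvRowSet m 0 i 0 else m)
        else m) m) ∧
    (∀ k, 1 ≤ k → PySem.List.pyGetD (is.foldl (fun m i =>
        if pvRowGet m tf i == 1 then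
          (if pvRowGet m 0 i == 1 then pvRowSet m 0 i 0 else m)
        else m) m) k [] = PySem.List.pyGetD m k []) ∧
    (∀ j, 1 ≤ j → j < n →
      (pvRowGet (is.foldl (fun m i =>
        if pvRowGet m tf i == 1 then
          (if pvRowGet m 0 i == 1 then pvRowSet m 0 i 0 else m)
        else m) m) 0 j = 1 ↔
        pvRowGet m 0 j = 1 ∧ ¬(j ∈ is ∧ pvRowGet m tf j = 1))) := by
  induction is generalizing m with
  | nil =>
      refine ⟨hm, fun k hk => rfl, fun j hj hj' => ?_⟩
      simp
  | cons i is ih =>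
      obtain ⟨hi1, hi2⟩ := his i List.mem_cons_self
      have his' : ∀ x ∈ is, 1 ≤ x ∧ x < n := fun x hx => his x (List.mem_cons_of_mem _ hx)
      rw [List.foldl_cons]
      set m' := if pvRowGet m tf i == 1 then
          (if pvRowGet m 0 i == 1 then pvRowSet m 0 i 0 else m) else m with hm'def
      have hm'shape : pvShape n m' := by
        rw [hm'def]; split_ifs <;> first | exact pvShape_rowSet n m hm _ _ _ le_rfl (by omega) | exact hm
      have hm'rows : ∀ k, 1 ≤ k → PySem.List.pyGetD m' k [] = PySem.List.pyGetD m k [] := by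
        intro k hk
        rw [hm'def]; split_ifs <;> first | exact pvRows_rowSet0 m _ _ _ hk | rfl
      have hm'row0 : ∀ j, 1 ≤ j → j < n →
          (pvRowGet m' 0 j = 1 ↔ pvRowGet m 0 j = 1 ∧ ¬(j = i ∧ pvRowGet m tf j = 1)) := by
        intro j hj hj'
        rw [hm'def]
        split_ifs with h1 h2
        · rw [beq_iff_eq] at h1 h2
          rw [pvRowGet_rowSet n m hm _ _ _ _ _ le_rfl (by omega) (by omega) (by omega) le_rfl (by omega) (by omega) hj']
          split_ifs with h3
          · constructor
            · intro h; omega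
            · rintro ⟨_, h⟩; exact absurd ⟨h3.2.symm ▸ rfl, by rw [h3.2]; exact h1⟩ h
          · constructor
            · intro h; refine ⟨h, ?_⟩; rintro ⟨rfl, _⟩; exact h3 ⟨rfl, rfl⟩
            · exact fun h => h.1
        · rw [beq_iff_eq] at h1
          simp only [Bool.not_eq_true, beq_eq_false_iff_ne] at h2
          constructor
          · intro h; refine ⟨h, ?_⟩; rintro ⟨rfl, _⟩; exact h2 h
          · exact fun h => h.1
        · simp only [Bool.not_eq_true, beq_eq_false_iff_ne] at h1
          constructor
          · intro h; refine ⟨h, ?_⟩; rintro ⟨rfl, hc⟩; exact h1 hc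
          · exact fun h => h.1
      obtain ⟨hsh, hrows, hrow0⟩ := ih his' m' hm'shape
      refine ⟨hsh, fun k hk => (hrows k hk).trans (hm'rows k hk), fun j hj hj' => ?_⟩
      rw [hrow0 j hj hj', hm'row0 j hj hj',
        pvRowGet_congr_row m m' tf j (hm'rows tf htf)]
      simp only [List.mem_cons]
      tauto

set_option maxHeartbeats 1000000 in
lemma pvRemoveTf_spec (n : Int) (m : List (List Int)) (hm : pvShape n m)
    (tf : Int) (htf : 1 ≤ tf) (htf' : tf < n) :
    pvShape n (pvRemoveTf n m tf) ∧
    (∀ i, 1 ≤ i → PySem.List.pyGetD (pvRemoveTf n m tf) i [] = PySem.List.pyGetD m i []) ∧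
    (∀ j, 1 ≤ j → j < n →
      (pvRowGet (pvRemoveTf n m tf) 0 j = 1 ↔
        pvRowGet m 0 j = 1 ∧ j ≠ tf ∧ pvRowGet m tf j ≠ 1)) := by
  set m1 := if pvRowGet m 0 tf == 1 then pvRowSet m 0 tf 0 else m with hm1def
  have hm1shape : pvShape n m1 := by
    rw [hm1def]; split_ifs <;> first | exact pvShape_rowSet n m hm _ _ _ le_rfl (by omega) | exact hm
  have hm1rows : ∀ k, 1 ≤ k → PySem.List.pyGetD m1 k [] = PySem.List.pyGetD m k [] := by
    intro k hk; rw [hm1def]; split_ifs <;> first | exact pvRows_rowSet0 m _ _ _ hk | rfl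
  have hm1row0 : ∀ j, 1 ≤ j → j < n →
      (pvRowGet m1 0 j = 1 ↔ pvRowGet m 0 j = 1 ∧ j ≠ tf) := by
    intro j hj hj'
    rw [hm1def]
    split_ifs with h1
    · rw [beq_iff_eq] at h1
      rw [pvRowGet_rowSet n m hm _ _ _ _ _ le_rfl (by omega) (by omega) htf' le_rfl (by omega) (by omega) hj']
      split_ifs with h3
      · constructor
        · intro h; omega
        · rintro ⟨_, h⟩; exact absurd h3.2 h
      · constructor
        · intro h; refine ⟨h, ?_⟩; intro hc; exact h3 ⟨rfl, hc⟩
        · exact fun h => h.1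
    · simp only [Bool.not_eq_true, beq_eq_false_iff_ne] at h1
      constructor
      · intro h; refine ⟨h, ?_⟩; rintro rfl; exact h1 h
      · exact fun h => h.1
  have his : ∀ i ∈ PySem.List.pyRange 1 n 1, 1 ≤ i ∧ i < n := by
    intro i hi; rw [PySem.List.mem_pyRange_one] at hi; exact hi
  obtain ⟨hsh, hrows, hrow0⟩ := pvInner_spec n tf htf htf' (PySem.List.pyRange 1 n 1) his m1 hm1shape
  refine ⟨hsh, fun i hi => (hrows i hi).trans (hm1rows i hi), fun j hj hj' => ?_⟩
  have : pvRemoveTf n m tf = (PySem.List.pyRange 1 n 1).foldl (fun m i =>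
      if pvRowGet m tf i == 1 then
        (if pvRowGet m 0 i == 1 then pvRowSet m 0 i 0 else m)
      else m) m1 := rfl
  rw [this, hrow0 j hj hj', hm1row0 j hj hj',
    pvRowGet_congr_row m m1 tf j (hm1rows tf htf)]
  have hjmem : j ∈ PySem.List.pyRange 1 n 1 := PySem.List.mem_pyRange_one.mpr ⟨hj, hj'⟩
  constructor
  · rintro ⟨⟨h1, h2⟩, h3⟩
    exact ⟨h1, h2, fun hc => h3 ⟨hjmem, hc⟩⟩
  · rintro ⟨h1, h2, h3⟩
    exact ⟨⟨h1, h2⟩, fun hc => h3 hc.2⟩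

lemma pvRemoveFold_spec (n : Int) (tfs : List Int) (h : ∀ t ∈ tfs, 1 ≤ t ∧ t < n)
    (m : List (List Int)) (hm : pvShape n m) :
    pvShape n (tfs.foldl (pvRemoveTf n) m) ∧
    (∀ i, 1 ≤ i → PySem.List.pyGetD (tfs.foldl (pvRemoveTf n) m) i [] = PySem.List.pyGetD m i []) ∧
    (∀ j, 1 ≤ j → j < n →
      (pvRowGet (tfs.foldl (pvRemoveTf n) m) 0 j = 1 ↔
        pvRowGet m 0 j = 1 ∧ ∀ t ∈ tfs, j ≠ t ∧ pvRowGet m t j ≠ 1)) := by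
  induction tfs generalizing m with
  | nil => exact ⟨hm, fun i hi => rfl, fun j hj hj' => by simp⟩
  | cons t ts ih =>
      obtain ⟨ht1, ht2⟩ := h t List.mem_cons_self
      have hts : ∀ x ∈ ts, 1 ≤ x ∧ x < n := fun x hx => h x (List.mem_cons_of_mem _ hx)
      rw [List.foldl_cons]
      obtain ⟨hsh1, hrows1, hrow01⟩ := pvRemoveTf_spec n m hm t ht1 ht2
      obtain ⟨hsh, hrows, hrow0⟩ := ih hts (pvRemoveTf n m t) hsh1
      refine ⟨hsh, fun i hi => (hrows i hi).trans (hrows1 i hi), fun j hj hj' => ?_⟩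
      rw [hrow0 j hj hj', hrow01 j hj hj']
      have hteq : ∀ u, 1 ≤ u → pvRowGet (pvRemoveTf n m t) u j = pvRowGet m u j :=
        fun u hu => pvRowGet_congr_row m _ u j (hrows1 u hu)
      simp only [List.mem_cons]
      constructor
      · rintro ⟨⟨h1, h2, h3⟩, h4⟩
        refine ⟨h1, ?_⟩
        rintro u (rfl | hu)
        · exact ⟨h2, h3⟩
        · have := h4 u hu
          rw [hteq u (hts u hu).1] at this
          exact this
      · rintro ⟨h1, h2⟩
        obtain ⟨h3, h4⟩ := h2 t (Or.inl rfl)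
        refine ⟨⟨h1, h3, h4⟩, fun u hu => ?_⟩
        rw [hteq u (hts u hu).1]
        exact h2 u (Or.inr hu)

-- ===== VERDICT (by name: the statement is the Claim_ definition above) =====
set_option maxHeartbeats 1000000 in
theorem configureProjectPresentation_spec : Claim_equal_configureProjectPresentation := by
  intro n fs hDom hPre
  unfold Spec_configureProjectPresentation
  by_cases hn : n < 3
  · simp only [configureProjectPresentation, configureProjectPresentation_alt, if_pos hn]
  · have hn3 : 3 ≤ n := by omega
    have hq : ∀ f ∈ fs, ¬ pvQuirk n f := by
      rcases hPre with h | h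
      · omega
      · intro f hf
        unfold pvQuirk
        exact (h f hf).2
    simp only [configureProjectPresentation, configureProjectPresentation_alt, if_neg hn]
    obtain ⟨hsh1, hcont⟩ := pvBuildM_spec n fs hq
    set m := pvBuildM n fs with hmdef
    set tfs := (PySem.List.pyRange 1 n 1).filter (fun i => pvRowGet m 1 i == 1) with htfsdef
    have htfs : ∀ t ∈ tfs, 1 ≤ t ∧ t < n := by
      intro t ht
      rw [htfsdef, List.mem_filter, PySem.List.mem_pyRange_one] at ht
      exact ht.1
    have htfs_mem : ∀ t, t ∈ tfs ↔ (1 ≤ t ∧ t < n) ∧ pvEdg n fs 2 (t + 1) := by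
      intro t
      rw [htfsdef, List.mem_filter, PySem.List.mem_pyRange_one]
      constructor
      · rintro ⟨h1, h2⟩
        rw [beq_iff_eq] at h2
        have := (hcont 1 t (by omega) (by omega) (by omega : (0:Int) ≤ t) h1.2).mp h2
        norm_num at this
        exact ⟨h1, this⟩
      · rintro ⟨h1, h2⟩
        refine ⟨h1, beq_iff_eq.mpr ?_⟩
        apply (hcont 1 t (by omega) (by omega) (by omega : (0:Int) ≤ t) h1.2).mpr
        norm_num
        exact h2
    obtain ⟨hsh2, hrows2, hrow02⟩ := pvRemoveFold_spec n tfs htfs m hsh1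
    set m2 := tfs.foldl (pvRemoveTf n) m with hm2def
    have hban : ∀ j, 1 ≤ j → j < n →
        ((∀ t ∈ tfs, j ≠ t ∧ pvRowGet m t j ≠ 1) ↔ ¬ pvBan n fs (j + 1)) := by
      intro j hj hj'
      constructor
      · intro h hb
        rcases hb with h2 | ⟨u, hu2, hu1, hux⟩
        · have hmem : j ∈ tfs := (htfs_mem j).mpr ⟨⟨hj, hj'⟩, h2⟩
          exact (h j hmem).1 rfl
        · obtain ⟨_, _, hu1', hu2'⟩ := pvEdg_bound n fs 2 u hu2
          have hmem : u - 1 ∈ tfs := by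
            apply (htfs_mem (u - 1)).mpr
            have : u - 1 + 1 = u := by omega
            rw [this]
            exact ⟨by omega, hu2⟩
          apply (h (u - 1) hmem).2
          apply (hcont (u - 1) j (by omega) (by omega) (by omega) hj').mpr
          have : u - 1 + 1 = u := by omega
          rw [this]
          exact hux
      · intro hnb t htmem
        obtain ⟨⟨ht1, ht2⟩, hedg⟩ := (htfs_mem t).mp htmem
        constructor
        · rintro rfl
          exact hnb (Or.inl hedg)
        · intro hc
          have := (hcont t j (by omega) (by omega) (by omega) hj').mp hc
          exact hnb (Or.inr ⟨t + 1, hedg, by omega, this⟩)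
    set LA := ((PySem.List.pyRange 1 n 1).filter
        (fun i => pvRowGet m2 0 i == 1 && !(i == 1))).map (fun i => i + 1) with hLAdef
    have hmemA : ∀ s, s ∈ LA ↔ pvEdg n fs 1 s ∧ 2 < s ∧ ¬ pvBan n fs s := by
      intro s
      rw [hLAdef, List.mem_map]
      constructor
      · rintro ⟨j, hjmem, rfl⟩
        rw [List.mem_filter, PySem.List.mem_pyRange_one] at hjmem
        obtain ⟨⟨hj1, hj2⟩, hcond⟩ := hjmem
        rw [Bool.and_eq_true, beq_iff_eq, Bool.not_eq_true', beq_eq_false_iff_ne] at hcond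
        obtain ⟨hrg, hne1⟩ := hcond
        rw [hrow02 j hj1 hj2] at hrg
        obtain ⟨h0, hall⟩ := hrg
        have h1 : pvEdg n fs 1 (j + 1) := by
          have := (hcont 0 j (by omega) (by omega) (by omega : (0:Int) ≤ j) hj2).mp h0
          norm_num at this
          exact this
        exact ⟨h1, by omega, (hban j hj1 hj2).mp hall⟩
      · rintro ⟨h1, hs, hnb⟩
        obtain ⟨_, _, hs1, hs2⟩ := pvEdg_bound n fs 1 s h1
        refine ⟨s - 1, ?_, by omega⟩
        rw [List.mem_filter, PySem.List.mem_pyRange_one]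
        refine ⟨⟨by omega, by omega⟩, ?_⟩
        rw [Bool.and_eq_true, beq_iff_eq, Bool.not_eq_true', beq_eq_false_iff_ne]
        have hseq : s - 1 + 1 = s := by omega
        constructor
        · rw [hrow02 (s - 1) (by omega) (by omega)]
          constructor
          · apply (hcont 0 (s - 1) (by omega) (by omega) (by omega) (by omega)).mpr
            rw [hseq]
            norm_num
            exact h1
          · apply (hban (s - 1) (by omega) (by omega)).mpr
            rw [hseq]
            exact hnb
        · omega
    have hpairA : LA.Pairwise (· < ·) := by
      rw [hLAdef]
      apply List.pairwise_map.mpr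
      apply List.Pairwise.imp (fun {a b} (h : a < b) => by omega : ∀ {a b : Int}, a < b → a + 1 < b + 1)
      exact (PySem.List.pairwise_lt_pyRange_one 1 n).filter _
    have hnodupA : LA.Nodup := hpairA.imp (fun h => ne_of_lt h)
    have hnodupI : (pvInvites n fs (pvBanned n fs (pvTwo n fs))).Nodup := by
      unfold pvInvites
      exact nodup_foldl_pass _ _ _ _ _ _ _ List.nodup_nil
    have hperm : LA.Perm (pvInvites n fs (pvBanned n fs (pvTwo n fs))) := by
      rw [List.perm_ext_iff_of_nodup hnodupA hnodupI]
      intro a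
      rw [hmemA a, mem_pvInvites]
    have hsort : PySem.List.sorted (pvInvites n fs (pvBanned n fs (pvTwo n fs))) (fun x => x) = LA :=
      PySem.List.sorted_eq_of_perm_of_pairwise_lt _ _ _ hperm hpairA
    rw [hsort]
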